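-- pv_equiv track=rewrite | github.com/Pratyaksh7/Algorithmic-Toolbox | week 2/assignment7.py | SumFib
-- ===== SOURCE A (Python) =====
-- def SumFib(n, m):
--     if m > n:
--         m, n = n, m
--     result = []
--     for i in range(0, n+1):
--         if i <= 1:
--             result.append(i)
--         else:
--             result.append(result[i-1] + result[i-2])
--
--     add = 0
--     for i in range(m, n+1):
--         add += result[i]
--
--     return (add % 10)
-- ===== SOURCE B (Python) =====
-- def SumFib(n, m):
--     if m > n:
--         m, n = n, m
--     # sum_{i=m}^{n} F(i) = F(n+2) - F(m+1); Fibonacci mod 10 has Pisano period 60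
--     def fib_mod10(k):
--         a, b = 0, 1
--         for _ in range(k % 60):
--             a, b = b, (a + b) % 10
--         return a
--     return (fib_mod10(n + 2) - fib_mod10(m + 1)) % 10
-- ===== Notes on version B (the rewrite author's own statement) =====
-- stated objective: faster
-- what changed: Replaces the O(n) big-integer Fibonacci table plus summation loop with the closed form sum F(m..n) = F(n+2)-F(m+1) evaluated mod 10 via the Pisano period 60 (at most 59 single-digit additions).
-- outside the precondition, e.g. on SumFib(5, -2): A returns 0, B returns 2
import Mathlib
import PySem

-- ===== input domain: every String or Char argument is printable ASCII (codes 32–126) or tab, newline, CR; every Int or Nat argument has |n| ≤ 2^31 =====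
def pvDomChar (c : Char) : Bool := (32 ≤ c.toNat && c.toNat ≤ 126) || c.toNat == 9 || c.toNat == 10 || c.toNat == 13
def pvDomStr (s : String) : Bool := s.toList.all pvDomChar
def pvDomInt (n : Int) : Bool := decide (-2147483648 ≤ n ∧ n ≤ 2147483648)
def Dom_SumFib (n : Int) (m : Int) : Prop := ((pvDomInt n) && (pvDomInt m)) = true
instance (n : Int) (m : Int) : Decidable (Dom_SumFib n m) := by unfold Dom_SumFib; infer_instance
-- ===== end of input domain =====

-- B replaces A's O(n) big-integer Fibonacci table and summation loop with the O(1)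
-- closed form sum F(m..n) = F(n+2) - F(m+1) computed mod 10 via the Pisano period 60.


-- ===== PORT A =====
def SumFib (n : Int) (m : Int) : Int :=
  let p := if m > n then (n, m) else (m, n)
  let result := (PySem.List.pyRange 0 (p.2 + 1) 1).foldl
      (fun res i =>
        if i ≤ 1 then res ++ [i]
        else res ++ [PySem.List.pyGetD res (i - 1) 0 + PySem.List.pyGetD res (i - 2) 0]) []
  let add := (PySem.List.pyRange p.1 (p.2 + 1) 1).foldl
      (fun a i => a + PySem.List.pyGetD result i 0) 0
  PySem.Int.mod add 10

-- ===== PORT B =====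
def fibMod10 (k : Int) : Int :=
  ((List.range (PySem.Int.mod k 60).toNat).foldl
      (fun (ab : Int × Int) _ => (ab.2, PySem.Int.mod (ab.1 + ab.2) 10)) (0, 1)).1

def SumFib_alt (n : Int) (m : Int) : Int :=
  let p := if m > n then (n, m) else (m, n)
  PySem.Int.mod (fibMod10 (p.2 + 2) - fibMod10 (p.1 + 1)) 10

-- ===== PRECONDITION & SPEC =====
-- Pre_ restricts to the problem's natural domain of nonnegative Fibonacci indices: with a
-- negative argument A raises IndexError (both negative, or min < -(max+1)) or, when it does
-- return, its value is an accident of Python negative-index wraparound.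
def Pre_SumFib (n : Int) (m : Int) : Prop := 0 ≤ n ∧ 0 ≤ m
instance (n : Int) (m : Int) : Decidable (Pre_SumFib n m) := by unfold Pre_SumFib; infer_instance
def pvWitness_SumFib : Int × Int := (3, 1)

def Spec_SumFib (n : Int) (m : Int) (out : Int) : Prop := out = SumFib_alt n m
instance (n : Int) (m : Int) (out : Int) : Decidable (Spec_SumFib n m out) := by unfold Spec_SumFib; infer_instance

-- ===== CLAIM (what is proved, stated in full; the proofs are below) =====
def Claim_equal_SumFib : Prop := ∀ (n : Int) (m : Int), Dom_SumFib n m → Pre_SumFib n m → Spec_SumFib n m (SumFib n m)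

-- ===== LEMMAS AND PROOFS =====

-- Fibonacci mod 10 has period 60
lemma pvFibPeriod : ∀ k : Nat, Nat.fib (k + 60) % 10 = Nat.fib k % 10
  | 0 => by decide
  | 1 => by decide
  | (k+2) => by
    have h1 := pvFibPeriod k
    have h2 := pvFibPeriod (k+1)
    have e1 : Nat.fib (k + 2 + 60) = Nat.fib (k + 60) + Nat.fib (k + 1 + 60) := by
      rw [show k + 2 + 60 = (k + 60) + 2 from by omega, Nat.fib_add_two (n := k + 60),
          show k + 60 + 1 = k + 1 + 60 from by omega]
    have e2 : Nat.fib (k + 2) = Nat.fib k + Nat.fib (k + 1) := Nat.fib_add_two (n := k)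
    omega

lemma pvFibMod60 (k : Nat) : Nat.fib k % 10 = Nat.fib (k % 60) % 10 := by
  have aux : ∀ q r : Nat, Nat.fib (60 * q + r) % 10 = Nat.fib r % 10 := by
    intro q
    induction q with
    | zero => intro r; simp
    | succ q ih =>
      intro r
      rw [show 60 * (q + 1) + r = (60 * q + r) + 60 from by omega, pvFibPeriod, ih]
  conv_lhs => rw [show k = 60 * (k / 60) + k % 60 from (Nat.div_add_mod k 60).symm]
  exact aux _ _

-- B's loop computes the pair (fib r % 10, fib (r+1) % 10)
lemma pvFibLoop (r : Nat) :
    (List.range r).foldl (fun (ab : Int × Int) _ => (ab.2, PySem.Int.mod (ab.1 + ab.2) 10)) (0, 1)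
      = (((Nat.fib r % 10 : Nat) : Int), ((Nat.fib (r + 1) % 10 : Nat) : Int)) := by
  induction r with
  | zero => simp
  | succ r ih =>
    rw [List.range_succ, List.foldl_append, ih]
    simp only [List.foldl_cons, List.foldl_nil]
    refine Prod.ext rfl ?_
    show PySem.Int.mod (((Nat.fib r % 10 : Nat) : Int) + ((Nat.fib (r + 1) % 10 : Nat) : Int)) 10
      = ((Nat.fib (r + 1 + 1) % 10 : Nat) : Int)
    rw [PySem.Int.mod_eq_emod_of_pos (by norm_num)]
    have h : Nat.fib (r + 1 + 1) = Nat.fib r + Nat.fib (r + 1) := Nat.fib_add_two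
    omega

lemma pvFibMod10Cast (k : Nat) : fibMod10 (k : Int) = ((Nat.fib k % 10 : Nat) : Int) := by
  unfold fibMod10
  have hm : PySem.Int.mod (k : Int) 60 = ((k % 60 : Nat) : Int) := by
    exact_mod_cast PySem.Int.mod_natCast k 60
  rw [hm, Int.toNat_natCast, pvFibLoop]
  show ((Nat.fib (k % 60) % 10 : Nat) : Int) = _
  exact congrArg (fun t : Nat => (t : Int)) (pvFibMod60 k).symm

-- A's first loop builds the Fibonacci table
lemma pvBuild (N : Nat) :
    (PySem.List.pyRange 0 ((N : Int) + 1) 1).foldl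
      (fun res i =>
        if i ≤ 1 then res ++ [i]
        else res ++ [PySem.List.pyGetD res (i - 1) 0 + PySem.List.pyGetD res (i - 2) 0]) []
      = (List.range (N + 1)).map (fun j => (Nat.fib j : Int)) := by
  induction N with
  | zero =>
    rw [show ((0 : Nat) : Int) + 1 = 0 + 1 from by norm_num, PySem.List.pyRange_one_singleton]
    decide
  | succ N ih =>
    have hsplit : PySem.List.pyRange 0 (((N + 1 : Nat) : Int) + 1) 1
        = PySem.List.pyRange 0 ((N : Int) + 1) 1 ++ [(N : Int) + 1] := by
      rw [show (((N + 1 : Nat) : Int) + 1) = ((N : Int) + 1) + 1 from by push_cast; ring]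
      exact PySem.List.pyRange_one_succ_right (by positivity)
    rw [hsplit, List.foldl_append, ih]
    simp only [List.foldl_cons, List.foldl_nil]
    by_cases hN : N = 0
    · subst hN; decide
    · rw [if_neg (by omega)]
      have e1 : ((N : Int) + 1 - 1) = ((N : Nat) : Int) := by ring
      have e2 : ((N : Int) + 1 - 2) = (((N - 1 : Nat)) : Int) := by omega
      rw [e1, e2, PySem.List.pyGetD_natCast, PySem.List.pyGetD_natCast,
          PySem.List.getD_map_range _ _ _ _ (by omega),
          PySem.List.getD_map_range _ _ _ _ (by omega),
          List.range_succ (n := N + 1), List.map_append]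
      have h2 : Nat.fib (N + 1) = Nat.fib (N - 1) + Nat.fib N := by
        rw [show N + 1 = (N - 1) + 2 from by omega, Nat.fib_add_two,
            show N - 1 + 1 = N from by omega]
      simp only [List.map_cons, List.map_nil, h2]
      congr 2
      push_cast
      ring

-- the generic foldl-is-sum step for A's second loop
lemma pvFoldSum (f : Nat → Int) (r : Nat) :
    (List.range r).foldl (fun a k => a + f k) 0 = ∑ k ∈ Finset.range r, f k := by
  induction r with
  | zero => simp
  | succ r ih => rw [List.range_succ, List.foldl_append, ih, Finset.sum_range_succ]; simp

lemma pvCore (M N : Nat) (h : M ≤ N) :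
    PySem.Int.mod
      ((PySem.List.pyRange (M : Int) ((N : Int) + 1) 1).foldl
        (fun a i => a + PySem.List.pyGetD
          ((PySem.List.pyRange 0 ((N : Int) + 1) 1).foldl
            (fun res i =>
              if i ≤ 1 then res ++ [i]
              else res ++ [PySem.List.pyGetD res (i - 1) 0 + PySem.List.pyGetD res (i - 2) 0]) [])
          i 0) 0) 10
    = PySem.Int.mod (fibMod10 ((N : Int) + 2) - fibMod10 ((M : Int) + 1)) 10 := by
  rw [pvBuild]
  -- second loop is the sum of fib M .. fib N
  have hrange : PySem.List.pyRange (M : Int) ((N : Int) + 1) 1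
      = (List.range (N + 1 - M)).map (fun (k : Nat) => (M : Int) + (k : Int)) := by
    rw [PySem.List.pyRange_one, show (((N : Int) + 1) - (M : Int)).toNat = N + 1 - M from by omega]
  rw [hrange, List.foldl_map]
  have hcong : (List.range (N + 1 - M)).foldl
      (fun a (k : Nat) => a + PySem.List.pyGetD
        ((List.range (N + 1)).map (fun j => (Nat.fib j : Int))) ((M : Int) + (k : Int)) 0) 0
      = (List.range (N + 1 - M)).foldl (fun a (k : Nat) => a + (Nat.fib (M + k) : Int)) 0 := by
    apply PySem.List.foldl_congr_mem
    intro acc k hk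
    have hk' : k < N + 1 - M := List.mem_range.mp hk
    rw [show ((M : Int) + (k : Int)) = (((M + k : Nat)) : Int) from by push_cast; ring,
        PySem.List.pyGetD_natCast, PySem.List.getD_map_range _ _ _ _ (by omega)]
  rw [hcong, pvFoldSum]
  -- the sum identity and the Pisano reduction
  have hsum : (∑ k ∈ Finset.range (N + 1 - M), (Nat.fib (M + k) : Int))
      = ((∑ k ∈ Finset.range (N + 1 - M), Nat.fib (M + k) : Nat) : Int) := by push_cast; rfl
  have hsplit : ∑ k ∈ Finset.range M, Nat.fib k + ∑ k ∈ Finset.range (N + 1 - M), Nat.fib (M + k)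
      = ∑ k ∈ Finset.range (N + 1), Nat.fib k := by
    rw [show N + 1 = M + (N + 1 - M) from by omega, Finset.sum_range_add]
    simp
  have h1 : Nat.fib (N + 2) = ∑ k ∈ Finset.range (N + 1), Nat.fib k + 1 :=
    Nat.fib_succ_eq_succ_sum (N + 1)
  have h2 : Nat.fib (M + 1) = ∑ k ∈ Finset.range M, Nat.fib k + 1 :=
    Nat.fib_succ_eq_succ_sum M
  have hS : (∑ k ∈ Finset.range (N + 1 - M), Nat.fib (M + k)) + Nat.fib (M + 1)
      = Nat.fib (N + 2) := by omega
  rw [hsum,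
      show ((N : Int) + 2) = (((N + 2 : Nat)) : Int) from by push_cast; ring,
      show ((M : Int) + 1) = (((M + 1 : Nat)) : Int) from by push_cast; ring,
      pvFibMod10Cast, pvFibMod10Cast,
      PySem.Int.mod_eq_emod_of_pos (by norm_num), PySem.Int.mod_eq_emod_of_pos (by norm_num)]
  omega

-- ===== VERDICT (by name: the statement is the Claim_ definition above) =====
theorem SumFib_spec : Claim_equal_SumFib := by
  intro n m _ hpre
  obtain ⟨hn, hm⟩ := hpre
  show SumFib n m = SumFib_alt n m
  unfold SumFib SumFib_alt
  by_cases hgt : m > n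
  · simp only [if_pos hgt]
    have := pvCore n.toNat m.toNat (by omega)
    rw [show ((n.toNat : Int)) = n from Int.toNat_of_nonneg hn,
        show ((m.toNat : Int)) = m from Int.toNat_of_nonneg hm] at this
    exact this
  · simp only [if_neg hgt]
    have := pvCore m.toNat n.toNat (by omega)
    rw [show ((m.toNat : Int)) = m from Int.toNat_of_nonneg hm,
        show ((n.toNat : Int)) = n from Int.toNat_of_nonneg hn] at this
    exact this
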